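-- pv_equiv track=rewrite | github.com/yungangwu/RL | ddz/app/ddz/game/utils.py | decode_action
-- ===== SOURCE A (Python) =====
-- Action_Num = 16
--
-- ACTION_COUNT = [
--     0,
--     15,    # Action_Single = 1
--     36,    # Action_Sequence_Single = 2
--     13,    # Action_Pair = 3
--     52,    # Action_Sequence_Pair = 4
--     13,    # Action_Tri = 5
--     45,    # Action_Sequence_Tri = 6
--     13,    # Action_Tri_With_Single_Wing = 7
--     38,    # Action_Sequence_Tri_With_Single_Wing = 8
--     13,    # Action_Tri_With_Pair_Wing = 9
--     30,    # Action_Sequence_Tri_With_Pair_Wing = 10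
--     13,    # Action_Bomb_With_Single_Wing = 11
--     13,    # Action_Bomb_With_Pair_Wing = 12
--     13,    # Action_Bomb = 13
--     1,     # Action_Rocket = 14
--     1,     # Action_Pass = 15
-- ]
--
-- def decode_action(action):
--     action_base = 0
--     action_type = 0
--     action_index = 0
--     for i in range(0, Action_Num):
--         if action <= action_base + ACTION_COUNT[i]:
--             action_type = i
--             action_index = action - action_base
--             break
--         action_base = action_base + ACTION_COUNT[i]
--     return action_type, action_index
-- ===== SOURCE B (Python) =====
-- # Prefix-sum threshold table + hand-written binary search (bisect_left),
-- # replacing A's accumulate-and-compare linear walk.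
-- THRESH = [0, 15, 51, 64, 116, 129, 174, 187, 225, 238, 268, 281, 294, 307, 308, 309]
--
-- def decode_action(action):
--     lo, hi = 0, len(THRESH)
--     while lo < hi:
--         mid = (lo + hi) // 2
--         if THRESH[mid] < action:
--             lo = mid + 1
--         else:
--             hi = mid
--     if lo == len(THRESH):
--         return (0, 0)
--     return (lo, action - (THRESH[lo - 1] if lo > 0 else 0))
-- ===== Notes on version B (the rewrite author's own statement) =====
-- stated objective: alternative
-- what changed: Replaced the running-accumulator linear scan with a precomputed prefix-sum threshold table and a binary search (bisect_left) over it, subtracting the previous threshold to get the index.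
import Mathlib
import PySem

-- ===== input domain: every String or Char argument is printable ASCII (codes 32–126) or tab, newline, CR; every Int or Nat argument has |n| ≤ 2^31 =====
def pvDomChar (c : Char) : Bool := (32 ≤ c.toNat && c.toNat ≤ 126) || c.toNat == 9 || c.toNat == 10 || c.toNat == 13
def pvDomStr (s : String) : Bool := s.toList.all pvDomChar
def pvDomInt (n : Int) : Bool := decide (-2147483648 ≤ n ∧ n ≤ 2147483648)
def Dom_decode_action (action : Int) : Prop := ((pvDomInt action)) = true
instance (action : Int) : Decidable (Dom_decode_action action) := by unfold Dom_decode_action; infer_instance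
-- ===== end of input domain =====

-- B replaces A's accumulate-and-compare linear walk by a precomputed prefix-sum
-- threshold table plus a hand-written binary search (objective: alternative algorithm).

-- ===== PORT A =====
def ACTION_COUNT : List Int :=
  [0, 15, 36, 13, 52, 13, 45, 13, 38, 13, 30, 13, 13, 13, 1, 1]

-- A's for-loop with break: recurse down ACTION_COUNT carrying i and action_base;
-- falling through the loop leaves the initial (0, 0).
def pvLoopA (action : Int) : List Int → Int → Int → Int × Int
  | [], _, _ => (0, 0)
  | c :: rest, i, base =>
    if action ≤ base + c then (i, action - base)
    else pvLoopA action rest (i + 1) (base + c)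

def decode_action (action : Int) : Int × Int :=
  pvLoopA action ACTION_COUNT 0 0

-- ===== PORT B =====
def THRESH : List Int :=
  [0, 15, 51, 64, 116, 129, 174, 187, 225, 238, 268, 281, 294, 307, 308, 309]

-- Source B's while-loop binary search (bisect_left), lo/hi exactly as in the Python
def pvBisect (action : Int) (lo hi : Nat) : Nat :=
  if _h : lo < hi then
    let mid := (lo + hi) / 2
    if THRESH.getD mid 0 < action then pvBisect action (mid + 1) hi
    else pvBisect action lo mid
  else lo
termination_by hi - lo
decreasing_by all_goals omega

def decode_action_alt (action : Int) : Int × Int :=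
  let lo := pvBisect action 0 THRESH.length
  if lo = THRESH.length then (0, 0)
  else ((lo : Int), action - (if lo > 0 then THRESH.getD (lo - 1) 0 else 0))

-- ===== PRECONDITION & SPEC =====
def Spec_decode_action (action : Int) (out : Int × Int) : Prop := out = decode_action_alt action
instance (action : Int) (out : Int × Int) : Decidable (Spec_decode_action action out) := by unfold Spec_decode_action; infer_instance

-- ===== CLAIM (what is proved, stated in full; the proofs are below) =====
def Claim_equal_decode_action : Prop := ∀ (action : Int), Dom_decode_action action → Spec_decode_action action (decode_action action)

-- ===== LEMMAS AND PROOFS =====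

-- THRESH is monotone (it is a prefix-sum table)
theorem pvTHRESH_mono : ∀ i < 16, ∀ j < 16, i ≤ j → THRESH.getD i 0 ≤ THRESH.getD j 0 := by
  decide

-- bisect_left invariant: the result k keeps everything below k strictly
-- below `a` and everything from k on (within the table) at least `a`.
theorem pvBisect_spec (a : Int) : ∀ (n lo hi : Nat), hi - lo = n → lo ≤ hi → hi ≤ 16 →
    (∀ j, j < lo → THRESH.getD j 0 < a) →
    (∀ j, hi ≤ j → j < 16 → a ≤ THRESH.getD j 0) →
    lo ≤ pvBisect a lo hi ∧ pvBisect a lo hi ≤ hi ∧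
    (∀ j, j < pvBisect a lo hi → THRESH.getD j 0 < a) ∧
    (∀ j, pvBisect a lo hi ≤ j → j < 16 → a ≤ THRESH.getD j 0) := by
  intro n
  induction n using Nat.strong_induction_on with
  | _ n ih =>
    intro lo hi hn hlohi h16 hbelow habove
    rw [pvBisect]
    by_cases h : lo < hi
    · simp only [h, dif_pos]
      set mid := (lo + hi) / 2 with hmid
      have hm1 : lo ≤ mid := by omega
      have hm2 : mid < hi := by omega
      by_cases hc : THRESH.getD mid 0 < a
      · simp only [hc, if_pos]
        refine (ih (hi - (mid + 1)) (by omega) (mid + 1) hi rfl (by omega) h16 ?_ habove).imp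
          (by omega) (fun h => h)
        intro j hj
        rcases Nat.lt_or_ge j lo with hl | hl
        · exact hbelow j hl
        · calc THRESH.getD j 0 ≤ THRESH.getD mid 0 :=
              pvTHRESH_mono j (by omega) mid (by omega) (by omega)
            _ < a := hc
      · simp only [hc, if_neg, not_false_iff]
        refine (ih (mid - lo) (by omega) lo mid rfl (by omega) (by omega) hbelow ?_).imp
          (fun h => h) (fun h => ⟨by omega, h.2⟩)
        intro j hj hj16
        calc a ≤ THRESH.getD mid 0 := not_lt.mp hc
          _ ≤ THRESH.getD j 0 := pvTHRESH_mono mid (by omega) j hj16 hj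
    · simp only [h, dif_neg, not_false_iff]
      have heq : lo = hi := by omega
      subst heq
      exact ⟨le_refl lo, le_refl lo, hbelow, habove⟩

-- ===== VERDICT (by name: the statement is the Claim_ definition above) =====
set_option maxHeartbeats 2000000 in
theorem decode_action_spec : Claim_equal_decode_action := by
  intro a _
  unfold Spec_decode_action decode_action decode_action_alt
  have hlen : THRESH.length = 16 := rfl
  rw [hlen]
  obtain ⟨hk0, hk16, hlt, hge⟩ :=
    pvBisect_spec a 16 0 16 rfl (by omega) (le_refl 16)
      (by intro j h; omega) (by intro j h1 h2; omega)
  generalize hgen : pvBisect a 0 16 = k at hk0 hk16 hlt hge ⊢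
  have hub : k < 16 → a ≤ THRESH.getD k 0 := fun h => hge k (le_refl k) h
  have hlb : 0 < k → THRESH.getD (k - 1) 0 < a := fun h => hlt (k - 1) (by omega)
  clear hlt hge hgen
  interval_cases k <;>
    (try norm_num [THRESH, List.getD] at hub hlb) <;>
    simp only [pvLoopA, ACTION_COUNT] <;>
    norm_num [THRESH, List.getD] <;>
    (repeat first | rw [if_pos (by omega : a ≤ _)] | rw [if_neg (by omega : ¬ a ≤ _)]) <;>
    omega
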